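-- pv_equiv track=rewrite | github.com/willidert/HR_solutions | HackerRank/The Bomberman Game.py | explosion
-- ===== SOURCE A (Python) =====
-- def explosion(grid):
--     for i in range(len(grid)):
--         for j in range(len(grid[0])):
--             if grid[i][j] == 'X':
--                 grid[i][j] = '.'
--                 if i - 1 >= 0 and grid[i-1][j] == 'O':
--                     grid[i-1][j] = '.'
--                 if i + 1 < len(grid) and grid[i+1][j] == 'O':
--                     grid[i+1][j] = '.'
--                 if j - 1 >= 0 and grid[i][j-1] == 'O':
--                     grid[i][j-1] = '.'
--                 if j + 1 < len(grid[0]) and grid[i][j+1] == 'O':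
--                     grid[i][j+1] = '.'
--     return grid
-- ===== SOURCE B (Python) =====
-- def explosion(grid):
--     # Gather over an immutable snapshot instead of A's in-place scatter; same
--     # in-place mutation of the caller's row lists, same return value.
--     if not grid:
--         return grid
--     h, w = len(grid), len(grid[0])
--     orig = [row[:] for row in grid]
--
--     def boom(i, j):
--         v = orig[i][j]
--         if v == 'X':
--             return True
--         return v == 'O' and (
--             (i > 0 and orig[i-1][j] == 'X') or
--             (i + 1 < h and orig[i+1][j] == 'X') or
--             (j > 0 and orig[i][j-1] == 'X') or
--             (j + 1 < w and orig[i][j+1] == 'X'))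
--
--     for i in range(h):
--         grid[i][:w] = ['.' if boom(i, j) else orig[i][j] for j in range(w)]
--     return grid
-- ===== Notes on version B (the rewrite author's own statement) =====
-- stated objective: alternative
-- what changed: Replaces A's order-dependent in-place scatter (visit each X, dot it and overwrite adjacent O cells mid-scan) with a gather over an immutable snapshot: each cell is dotted iff it was originally X, or originally O with an orthogonal X neighbour in the snapshot; rows are rewritten once by slice assignment.
import Mathlib
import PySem

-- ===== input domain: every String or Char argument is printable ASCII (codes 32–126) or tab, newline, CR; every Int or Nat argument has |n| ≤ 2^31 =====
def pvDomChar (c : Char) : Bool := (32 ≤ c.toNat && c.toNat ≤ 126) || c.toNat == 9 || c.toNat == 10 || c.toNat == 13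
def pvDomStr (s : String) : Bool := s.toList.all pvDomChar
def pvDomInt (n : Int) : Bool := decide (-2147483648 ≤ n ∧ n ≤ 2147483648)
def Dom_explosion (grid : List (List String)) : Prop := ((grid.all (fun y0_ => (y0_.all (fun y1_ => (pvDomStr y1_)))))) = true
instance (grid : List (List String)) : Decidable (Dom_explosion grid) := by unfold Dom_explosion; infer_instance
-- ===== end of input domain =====

-- B replaces A's in-place scatter (dot each X and overwrite adjacent O cells mid-scan) with a
-- gather over an immutable snapshot of the grid; both mutate the caller's rows in place in Python,
-- and the theorems below are about the returned value.

-- ===== PORT A =====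
-- All reads/writes use Nat indices produced by `range`, in bounds under Pre_; `getD`/`List.set`
-- are exact there (Python raises exactly where Pre_ fails).
def at2 (g : List (List String)) (i j : Nat) : String :=
  (g.getD i []).getD j ""

def pySet2 (g : List (List String)) (i j : Nat) (v : String) : List (List String) :=
  g.set i ((g.getD i []).set j v)

-- the four guarded neighbour writes in the body of A's inner loop, one per `if` statement
def write1 (g : List (List String)) (i j : Nat) : List (List String) :=
  if 1 ≤ i ∧ at2 g (i-1) j = "O" then pySet2 g (i-1) j "." else g
def write2 (g : List (List String)) (i j : Nat) : List (List String) :=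
  if i+1 < g.length ∧ at2 g (i+1) j = "O" then pySet2 g (i+1) j "." else g
def write3 (g : List (List String)) (i j : Nat) : List (List String) :=
  if 1 ≤ j ∧ at2 g i (j-1) = "O" then pySet2 g i (j-1) "." else g
def write4 (g : List (List String)) (i j : Nat) : List (List String) :=
  if j+1 < (g.getD 0 []).length ∧ at2 g i (j+1) = "O" then pySet2 g i (j+1) "." else g

-- body of A's inner loop for one (i, j)
def explosionStep (g : List (List String)) (i j : Nat) : List (List String) :=
  if at2 g i j = "X" then
    write4 (write3 (write2 (write1 (pySet2 g i j ".") i j) i j) i j) i j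
  else g

def explosion (grid : List (List String)) : List (List String) :=
  (List.range grid.length).foldl
    (fun g i => (List.range (g.getD 0 []).length).foldl (fun g' j => explosionStep g' i j) g)
    grid

-- ===== PORT B =====
-- boom(i, j) of Source B
def boomB (orig : List (List String)) (h w i j : Nat) : Bool :=
  if at2 orig i j = "X" then true
  else if at2 orig i j = "O" then
    decide ((0 < i ∧ at2 orig (i-1) j = "X") ∨ (i+1 < h ∧ at2 orig (i+1) j = "X") ∨
            (0 < j ∧ at2 orig i (j-1) = "X") ∨ (j+1 < w ∧ at2 orig i (j+1) = "X"))
  else false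

def explosion_alt (grid : List (List String)) : List (List String) :=
  match grid with
  | [] => grid
  | r0 :: _ =>
    let h := grid.length
    let w := r0.length
    let orig := grid   -- row-by-row copy of grid taken before any write
    (List.range h).foldl
      (fun g i =>
        -- grid[i][:w] = ['.' if boom(i, j) else orig[i][j] for j in range(w)]
        g.set i (((List.range w).map (fun j => if boomB orig h w i j then "." else at2 orig i j))
                  ++ (g.getD i []).drop w))
      grid

-- ===== PRECONDITION & SPEC =====
-- Pre_ excludes exactly the ragged grids on which Python A raises IndexError: some row shorter
-- than row 0 (A indexes every row up to len(grid[0])).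
def Pre_explosion (grid : List (List String)) : Prop :=
  ∀ row ∈ grid, (grid.headD []).length ≤ row.length
instance (grid : List (List String)) : Decidable (Pre_explosion grid) := by
  unfold Pre_explosion; infer_instance

def pvWitness_explosion : List (List String) := [["X", "O", "."], ["O", ".", "O"]]

def Spec_explosion (grid : List (List String)) (out : List (List String)) : Prop := out = explosion_alt grid
instance (grid : List (List String)) (out : List (List String)) : Decidable (Spec_explosion grid out) := by unfold Spec_explosion; infer_instance

-- ===== CLAIM (what is proved, stated in full; the proofs are below) =====
def Claim_equal_explosion : Prop := ∀ (grid : List (List String)), Dom_explosion grid → Pre_explosion grid → Spec_explosion grid (explosion grid)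

-- ===== LEMMAS AND PROOFS =====

-- Cell (i, j) has been dotted after the first k cells (row-major, width W) of A's scan.
abbrev dottedA (G : List (List String)) (W k i j : Nat) : Prop :=
  (at2 G i j = "X" ∧ i*W + j < k) ∨
  (at2 G i j = "O" ∧
    ((0 < i ∧ at2 G (i-1) j = "X" ∧ (i-1)*W + j < k) ∨
     (i+1 < G.length ∧ at2 G (i+1) j = "X" ∧ (i+1)*W + j < k) ∨
     (0 < j ∧ at2 G i (j-1) = "X" ∧ i*W + (j-1) < k) ∨
     (j+1 < W ∧ at2 G i (j+1) = "X" ∧ i*W + (j+1) < k)))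

-- A's state after k cells of the scan
def render (G : List (List String)) (W k : Nat) : List (List String) :=
  G.mapIdx (fun i row => row.mapIdx (fun j v => if j < W ∧ dottedA G W k i j then "." else v))

-- getD-level characterizations of the in-place writes
lemma getD_set_row (g : List (List String)) (i i' : Nat) (r : List String) (hi : i < g.length) :
    (g.set i r).getD i' [] = if i' = i then r else g.getD i' [] := by
  simp only [List.getD_eq_getElem?_getD, List.getElem?_set]
  by_cases h : i' = i
  · simp [h, hi]
  · rw [if_neg (fun he : i = i' => h he.symm), if_neg h]

lemma length_pySet2 (g : List (List String)) (i j : Nat) (v : String) :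
    (pySet2 g i j v).length = g.length := by simp [pySet2]

lemma rowlen_pySet2 (g : List (List String)) (i j i' : Nat) (v : String) :
    ((pySet2 g i j v).getD i' []).length = (g.getD i' []).length := by
  by_cases hi : i < g.length
  · rw [pySet2, getD_set_row g i i' _ hi]
    by_cases h : i' = i <;> simp [h]
  · have h0 : g.set i ((g.getD i []).set j v) = g := List.set_eq_of_length_le (by omega)
    rw [pySet2, h0]

lemma at2_pySet2 (g : List (List String)) (i j i' j' : Nat) (v : String)
    (hi : i < g.length) (hj : j < (g.getD i []).length) :
    at2 (pySet2 g i j v) i' j' = if i' = i ∧ j' = j then v else at2 g i' j' := by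
  rw [List.getD_eq_getElem?_getD] at hj
  rw [at2, pySet2, getD_set_row g i i' _ hi]
  by_cases h : i' = i
  · subst h
    rw [if_pos rfl]
    by_cases h2 : j' = j
    · subst h2
      simp only [List.getD_eq_getElem?_getD, List.getElem?_set_self hj, Option.getD_some]
      simp
    · rw [if_neg (fun hh => h2 hh.2), at2]
      simp only [List.getD_eq_getElem?_getD,
        List.getElem?_set_ne (fun he : j = j' => h2 he.symm)]
  · have hne : ¬ (i' = i ∧ j' = j) := fun hh => h hh.1
    rw [if_neg h, if_neg hne, at2]

lemma length_ite_pySet2 (c : Prop) [Decidable c] (g : List (List String)) (i j : Nat) (v : String) :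
    (if c then pySet2 g i j v else g).length = g.length := by
  split
  · exact length_pySet2 g i j v
  · rfl

lemma rowlen_ite_pySet2 (c : Prop) [Decidable c] (g : List (List String)) (i j i' : Nat) (v : String) :
    ((if c then pySet2 g i j v else g).getD i' []).length = (g.getD i' []).length := by
  split
  · exact rowlen_pySet2 g i j i' v
  · rfl

lemma at2_ite_pySet2 (c : Prop) [Decidable c] (g : List (List String)) (i j i' j' : Nat) (v : String)
    (hb : c → i < g.length ∧ j < (g.getD i []).length) :
    at2 (if c then pySet2 g i j v else g) i' j' =
      if c ∧ i' = i ∧ j' = j then v else at2 g i' j' := by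
  by_cases hc : c
  · rcases hb hc with ⟨h1, h2⟩
    rw [if_pos hc, at2_pySet2 g i j i' j' v h1 h2]
    by_cases h : i' = i ∧ j' = j <;> simp [h, hc]
  · simp [hc]
-- shape and entries of render
lemma length_render (G : List (List String)) (W k : Nat) :
    (render G W k).length = G.length := by simp [render]

lemma getElem_render (G : List (List String)) (W k i : Nat) (hi : i < G.length) :
    (render G W k)[i]'(by simpa [length_render] using hi) =
      (G[i]).mapIdx (fun j v => if j < W ∧ dottedA G W k i j then "." else v) := by
  simp [render]

lemma rowlen_render (G : List (List String)) (W k i' : Nat) :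
    ((render G W k).getD i' []).length = (G.getD i' []).length := by
  by_cases hi : i' < G.length
  · rw [List.getD_eq_getElem?_getD, List.getD_eq_getElem?_getD,
      List.getElem?_eq_getElem (show i' < (render G W k).length by simpa [length_render] using hi),
      List.getElem?_eq_getElem hi]
    simp [getElem_render G W k i' hi]
  · rw [List.getD_eq_getElem?_getD, List.getD_eq_getElem?_getD,
      List.getElem?_eq_none (by simpa [render] using Nat.le_of_not_lt hi),
      List.getElem?_eq_none (Nat.le_of_not_lt hi)]

lemma getD_eq_getElem_of_lt (G : List (List String)) (i : Nat) (hi : i < G.length) :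
    G.getD i [] = G[i] := by
  rw [List.getD_eq_getElem?_getD, List.getElem?_eq_getElem hi]; rfl

lemma at2_eq_getElem (G : List (List String)) (i j : Nat)
    (hi : i < G.length) (hj : j < (G[i]).length) :
    at2 G i j = G[i][j] := by
  rw [at2, getD_eq_getElem_of_lt G i hi, List.getD_eq_getElem?_getD,
    List.getElem?_eq_getElem hj]; rfl

lemma at2_render (G : List (List String)) (W k i j : Nat)
    (hi : i < G.length) (hj : j < (G.getD i []).length) :
    at2 (render G W k) i j =
      if j < W ∧ dottedA G W k i j then "." else at2 G i j := by
  rw [getD_eq_getElem_of_lt G i hi] at hj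
  have hi' : i < (render G W k).length := by simpa [length_render] using hi
  have hj' : j < ((render G W k)[i]'(hi')).length := by
    rw [getElem_render G W k i hi]; simpa using hj
  rw [at2_eq_getElem _ i j hi' hj']
  simp only [getElem_render G W k i hi, List.getElem_mapIdx]
  by_cases hc : j < W ∧ dottedA G W k i j
  · rw [if_pos hc, if_pos hc]
  · rw [if_neg hc, if_neg hc, at2_eq_getElem G i j hi hj]

-- row-major position arithmetic
lemma pos_lt (H W i j : Nat) (hi : i < H) (hj : j < W) : i*W + j < H*W := by
  have h1 : i*W + j < (i+1)*W := by
    have : (i+1)*W = i*W + W := by ring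
    omega
  have h2 : (i+1)*W ≤ H*W := Nat.mul_le_mul_right W hi
  omega

lemma pos_inj (W i j i' j' : Nat) (hj : j < W) (hj' : j' < W)
    (h : i'*W + j' = i*W + j) : i' = i ∧ j' = j := by
  have hW : 0 < W := by omega
  have e1 : (i'*W + j') / W = i' := by
    rw [Nat.mul_comm i' W, Nat.mul_add_div hW, Nat.div_eq_of_lt hj']; omega
  have e2 : (i*W + j) / W = i := by
    rw [Nat.mul_comm i W, Nat.mul_add_div hW, Nat.div_eq_of_lt hj]; omega
  have e3 : (i'*W + j') % W = j' := by
    rw [Nat.mul_comm i' W, Nat.mul_add_mod, Nat.mod_eq_of_lt hj']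
  have e4 : (i*W + j) % W = j := by
    rw [Nat.mul_comm i W, Nat.mul_add_mod, Nat.mod_eq_of_lt hj]
  constructor
  · rw [← e1, ← e2, h]
  · rw [← e3, ← e4, h]

lemma not_dottedA_self (G : List (List String)) (W i j : Nat)
    (hx : at2 G i j = "X") : ¬ dottedA G W (i*W + j) i j := by
  rintro (⟨_, hlt⟩ | ⟨ho, _⟩)
  · omega
  · rw [hx] at ho; exact absurd ho (by decide)

lemma dottedA_mono (G : List (List String)) (W k k' i j : Nat) (hk : k ≤ k')
    (h : dottedA G W k i j) : dottedA G W k' i j := by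
  rcases h with ⟨h1, h2⟩ | ⟨h1, h2⟩
  · exact Or.inl ⟨h1, by omega⟩
  · refine Or.inr ⟨h1, ?_⟩
    rcases h2 with ⟨a, b, c⟩ | ⟨a, b, c⟩ | ⟨a, b, c⟩ | ⟨a, b, c⟩
    · exact Or.inl ⟨a, b, by omega⟩
    · exact Or.inr (Or.inl ⟨a, b, by omega⟩)
    · exact Or.inr (Or.inr (Or.inl ⟨a, b, by omega⟩))
    · exact Or.inr (Or.inr (Or.inr ⟨a, b, by omega⟩))

-- how the dotted set grows when A's scan passes cell (i, j)
lemma dottedA_succ (G : List (List String)) (W i j i' j' : Nat)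
    (hi : i < G.length) (hj : j < W) (hj' : j' < W) :
    dottedA G W (i*W + j + 1) i' j' ↔
      dottedA G W (i*W + j) i' j' ∨
      (at2 G i j = "X" ∧ ((i' = i ∧ j' = j) ∨
        (at2 G i' j' = "O" ∧ ((i'+1 = i ∧ j' = j) ∨ (i' = i+1 ∧ j' = j) ∨
          (i' = i ∧ j'+1 = j) ∨ (i' = i ∧ j' = j+1))))) := by
  constructor
  · rintro (⟨h1, h2⟩ | ⟨h1, h2⟩)
    · rcases Nat.lt_succ_iff_lt_or_eq.mp h2 with h2 | h2
      · exact Or.inl (Or.inl ⟨h1, h2⟩)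
      · obtain ⟨e1, e2⟩ := pos_inj W i j i' j' hj hj' h2
        exact Or.inr ⟨by rw [← e1, ← e2]; exact h1, Or.inl ⟨e1, e2⟩⟩
    · rcases h2 with ⟨a, b, c⟩ | ⟨a, b, c⟩ | ⟨a, b, c⟩ | ⟨a, b, c⟩
      · rcases Nat.lt_succ_iff_lt_or_eq.mp c with c | c
        · exact Or.inl (Or.inr ⟨h1, Or.inl ⟨a, b, c⟩⟩)
        · obtain ⟨e1, e2⟩ := pos_inj W i j (i'-1) j' hj hj' c
          exact Or.inr ⟨by rw [← e1, ← e2]; exact b,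
            Or.inr ⟨h1, Or.inr (Or.inl ⟨by omega, e2⟩)⟩⟩
      · rcases Nat.lt_succ_iff_lt_or_eq.mp c with c | c
        · exact Or.inl (Or.inr ⟨h1, Or.inr (Or.inl ⟨a, b, c⟩)⟩)
        · obtain ⟨e1, e2⟩ := pos_inj W i j (i'+1) j' hj hj' c
          exact Or.inr ⟨by rw [← e1, ← e2]; exact b,
            Or.inr ⟨h1, Or.inl ⟨e1, e2⟩⟩⟩
      · rcases Nat.lt_succ_iff_lt_or_eq.mp c with c | c
        · exact Or.inl (Or.inr ⟨h1, Or.inr (Or.inr (Or.inl ⟨a, b, c⟩))⟩)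
        · obtain ⟨e1, e2⟩ := pos_inj W i j i' (j'-1) hj (by omega) c
          exact Or.inr ⟨by rw [← e1, ← e2]; exact b,
            Or.inr ⟨h1, Or.inr (Or.inr (Or.inr ⟨e1, by omega⟩))⟩⟩
      · rcases Nat.lt_succ_iff_lt_or_eq.mp c with c | c
        · exact Or.inl (Or.inr ⟨h1, Or.inr (Or.inr (Or.inr ⟨a, b, c⟩))⟩)
        · obtain ⟨e1, e2⟩ := pos_inj W i j i' (j'+1) hj a c
          exact Or.inr ⟨by rw [← e1, ← e2]; exact b,
            Or.inr ⟨h1, Or.inr (Or.inr (Or.inl ⟨e1, e2⟩))⟩⟩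
  · rintro (h | ⟨hx, h⟩)
    · exact dottedA_mono G W _ _ i' j' (by omega) h
    · rcases h with ⟨e1, e2⟩ | ⟨ho, h⟩
      · subst e1; subst e2
        exact Or.inl ⟨hx, by omega⟩
      · rcases h with ⟨e1, e2⟩ | ⟨e1, e2⟩ | ⟨e1, e2⟩ | ⟨e1, e2⟩
        · -- (i'+1, j') = (i, j): clause 2 (neighbour below)
          subst e2
          refine Or.inr ⟨ho, Or.inr (Or.inl ⟨by omega, ?_, ?_⟩)⟩
          · rw [e1]; exact hx
          · rw [e1]; omega
        · -- (i'-1, j') = (i, j): clause 1 (neighbour above)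
          subst e2
          refine Or.inr ⟨ho, Or.inl ⟨by omega, ?_, ?_⟩⟩
          · rw [show i' - 1 = i by omega]; exact hx
          · rw [show i' - 1 = i by omega]; omega
        · -- (i', j'+1) = (i, j): clause 4 (right neighbour)
          subst e1
          refine Or.inr ⟨ho, Or.inr (Or.inr (Or.inr ⟨by omega, ?_, ?_⟩))⟩
          · rw [e2]; exact hx
          · omega
        · -- (i', j'-1) = (i, j): clause 3 (left neighbour)
          subst e1
          refine Or.inr ⟨ho, Or.inr (Or.inr (Or.inl ⟨by omega, ?_, ?_⟩))⟩
          · rw [show j' - 1 = j by omega]; exact hx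
          · omega
lemma getD_zero_eq_headD (G : List (List String)) (h : G ≠ []) :
    G.getD 0 [] = G.headD [] := by
  cases G with
  | nil => exact absurd rfl h
  | cons r tl => rfl

lemma eq_of_at2_eq (g g' : List (List String)) (hl : g.length = g'.length)
    (hrl : ∀ i', (g.getD i' []).length = (g'.getD i' []).length)
    (hv : ∀ i' j', i' < g.length → j' < (g.getD i' []).length →
      at2 g i' j' = at2 g' i' j') : g = g' := by
  apply List.ext_getElem hl
  intro i' h1 h2
  have hrl' : (g[i']).length = (g'[i']).length := by
    have := hrl i'
    rwa [getD_eq_getElem_of_lt _ _ h1, getD_eq_getElem_of_lt _ _ h2] at this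
  apply List.ext_getElem hrl'
  intro j' hj1 hj2
  have := hv i' j' h1 (by rwa [getD_eq_getElem_of_lt _ _ h1])
  rwa [at2_eq_getElem _ _ _ h1 hj1, at2_eq_getElem _ _ _ h2 hj2] at this

lemma at2_write1 (g : List (List String)) (i j i' j' : Nat)
    (hb : (1 ≤ i ∧ at2 g (i-1) j = "O") → i-1 < g.length ∧ j < (g.getD (i-1) []).length) :
    at2 (write1 g i j) i' j' =
      if (1 ≤ i ∧ at2 g (i-1) j = "O") ∧ i' = i-1 ∧ j' = j then "." else at2 g i' j' := by
  rw [write1, at2_ite_pySet2 _ g (i-1) j i' j' "." hb]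

lemma at2_write2 (g : List (List String)) (i j i' j' : Nat)
    (hb : (i+1 < g.length ∧ at2 g (i+1) j = "O") → i+1 < g.length ∧ j < (g.getD (i+1) []).length) :
    at2 (write2 g i j) i' j' =
      if (i+1 < g.length ∧ at2 g (i+1) j = "O") ∧ i' = i+1 ∧ j' = j then "." else at2 g i' j' := by
  rw [write2, at2_ite_pySet2 _ g (i+1) j i' j' "." hb]

lemma at2_write3 (g : List (List String)) (i j i' j' : Nat)
    (hb : (1 ≤ j ∧ at2 g i (j-1) = "O") → i < g.length ∧ j-1 < (g.getD i []).length) :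
    at2 (write3 g i j) i' j' =
      if (1 ≤ j ∧ at2 g i (j-1) = "O") ∧ i' = i ∧ j' = j-1 then "." else at2 g i' j' := by
  rw [write3, at2_ite_pySet2 _ g i (j-1) i' j' "." hb]

lemma at2_write4 (g : List (List String)) (i j i' j' : Nat)
    (hb : (j+1 < (g.getD 0 []).length ∧ at2 g i (j+1) = "O") → i < g.length ∧ j+1 < (g.getD i []).length) :
    at2 (write4 g i j) i' j' =
      if (j+1 < (g.getD 0 []).length ∧ at2 g i (j+1) = "O") ∧ i' = i ∧ j' = j+1 then "." else at2 g i' j' := by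
  rw [write4, at2_ite_pySet2 _ g i (j+1) i' j' "." hb]

set_option maxHeartbeats 1600000 in
-- one pass of A's inner-loop body advances the rendered state by one cell
lemma step_render (G : List (List String)) (W i j : Nat)
    (hW : W = (G.headD []).length)
    (pre : ∀ row ∈ G, W ≤ row.length)
    (hi : i < G.length) (hj : j < W) :
    explosionStep (render G W (i*W + j)) i j = render G W (i*W + j + 1) := by
  have hne : G ≠ [] := by
    intro h; rw [h] at hi; simp at hi
  have hWle : ∀ i', i' < G.length → W ≤ (G.getD i' []).length := by
    intro i' h
    rw [getD_eq_getElem_of_lt G i' h]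
    exact pre _ (List.getElem_mem h)
  have hW0 : (G.getD 0 []).length = W := by rw [getD_zero_eq_headD G hne, hW]
  set k := i*W + j with hk
  set S := render G W k with hSdef
  have hlenS : S.length = G.length := length_render G W k
  have hrowS : ∀ i', (S.getD i' []).length = (G.getD i' []).length :=
    fun i' => rowlen_render G W k i'
  have hat2S : ∀ i' j', i' < G.length → j' < (G.getD i' []).length →
      at2 S i' j' = if j' < W ∧ dottedA G W k i' j' then "." else at2 G i' j' :=
    fun i' j' h1 h2 => at2_render G W k i' j' h1 h2
  by_cases hx : at2 G i j = "X"
  case neg =>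
    -- the scanned cell is not "X": nothing is written and the dotted set does not grow
    have hvS : ¬ at2 S i j = "X" := by
      rw [hat2S i j hi (lt_of_lt_of_le hj (hWle i hi))]
      split_ifs with hc
      · decide
      · exact hx
    rw [explosionStep, if_neg hvS]
    apply eq_of_at2_eq S (render G W (k+1))
      (by rw [hlenS, length_render])
      (fun i' => by rw [hrowS i', rowlen_render])
    intro i' j' h1 h2
    rw [hlenS] at h1
    rw [hrowS] at h2
    rw [hat2S i' j' h1 h2, at2_render G W (k+1) i' j' h1 h2]
    by_cases hjW : j' < W
    · have hiff : dottedA G W (k+1) i' j' ↔ dottedA G W k i' j' := by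
        rw [hk, dottedA_succ G W i j i' j' hi hj hjW]
        constructor
        · rintro (h | ⟨h, _⟩)
          · exact h
          · exact absurd h hx
        · exact Or.inl
      simp only [hiff]
    · simp [hjW]
  case pos =>
    -- the scanned cell is "X": it is dotted and its "O" neighbours are dotted
    have hrowiW : j < (G.getD i []).length := lt_of_lt_of_le hj (hWle i hi)
    have hvS : at2 S i j = "X" := by
      rw [hat2S i j hi hrowiW, if_neg]
      · exact hx
      · rintro ⟨_, hd⟩
        exact not_dottedA_self G W i j hx (hk ▸ hd)
    rw [explosionStep, if_pos hvS]
    -- shapes of the successive grids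
    have hlen1 : (pySet2 S i j ".").length = G.length := by
      rw [length_pySet2, hlenS]
    have hrow1 : ∀ i', ((pySet2 S i j ".").getD i' []).length = (G.getD i' []).length := by
      intro i'; rw [rowlen_pySet2, hrowS]
    have hlen2 : (write1 (pySet2 S i j ".") i j).length = G.length := by
      rw [write1, length_ite_pySet2, hlen1]
    have hrow2 : ∀ i', ((write1 (pySet2 S i j ".") i j).getD i' []).length = (G.getD i' []).length := by
      intro i'; rw [write1, rowlen_ite_pySet2, hrow1]
    have hlen3 : (write2 (write1 (pySet2 S i j ".") i j) i j).length = G.length := by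
      rw [write2, length_ite_pySet2, hlen2]
    have hrow3 : ∀ i', ((write2 (write1 (pySet2 S i j ".") i j) i j).getD i' []).length = (G.getD i' []).length := by
      intro i'; rw [write2, rowlen_ite_pySet2, hrow2]
    have hlen4 : (write3 (write2 (write1 (pySet2 S i j ".") i j) i j) i j).length = G.length := by
      rw [write3, length_ite_pySet2, hlen3]
    have hrow4 : ∀ i', ((write3 (write2 (write1 (pySet2 S i j ".") i j) i j) i j).getD i' []).length = (G.getD i' []).length := by
      intro i'; rw [write3, rowlen_ite_pySet2, hrow3]
    have hlen5 : (write4 (write3 (write2 (write1 (pySet2 S i j ".") i j) i j) i j) i j).length = G.length := by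
      rw [write4, length_ite_pySet2, hlen4]
    have hrow5 : ∀ i', ((write4 (write3 (write2 (write1 (pySet2 S i j ".") i j) i j) i j) i j).getD i' []).length = (G.getD i' []).length := by
      intro i'; rw [write4, rowlen_ite_pySet2, hrow4]
    -- the four guard conditions, reduced to conditions on the original grid
    have hC1 : (1 ≤ i ∧ at2 (pySet2 S i j ".") (i-1) j = "O") ↔
        (0 < i ∧ at2 G (i-1) j = "O" ∧ ¬ dottedA G W k (i-1) j) := by
      by_cases h0 : 0 < i
      · rw [at2_pySet2 S i j (i-1) j "." (by omega) (by rw [hrowS]; exact hrowiW),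
          if_neg (by omega), hat2S (i-1) j (by omega) (lt_of_lt_of_le hj (hWle (i-1) (by omega)))]
        by_cases hd : dottedA G W k (i-1) j
        · simp [hd, hj]
        · simp [hd, hj, h0]
          exact fun _ => h0
      · simp [h0, show ¬ 1 ≤ i by omega]
    have hC2 : (i+1 < (write1 (pySet2 S i j ".") i j).length ∧
          at2 (write1 (pySet2 S i j ".") i j) (i+1) j = "O") ↔
        (i+1 < G.length ∧ at2 G (i+1) j = "O" ∧ ¬ dottedA G W k (i+1) j) := by
      rw [hlen2]
      by_cases h0 : i+1 < G.length
      · rw [write1, at2_ite_pySet2 _ (pySet2 S i j ".") (i-1) j (i+1) j "."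
            (fun _ => ⟨by rw [hlen1]; omega, by rw [hrow1]; exact lt_of_lt_of_le hj (hWle (i-1) (by omega))⟩),
          if_neg (by rintro ⟨_, h, _⟩; omega),
          at2_pySet2 S i j (i+1) j "." (by omega) (by rw [hrowS]; exact hrowiW),
          if_neg (by omega),
          hat2S (i+1) j h0 (lt_of_lt_of_le hj (hWle (i+1) h0))]
        by_cases hd : dottedA G W k (i+1) j
        · simp [hd, hj]
        · simp [hd, hj, h0]
      · simp [h0]
    have hC3 : (1 ≤ j ∧ at2 (write2 (write1 (pySet2 S i j ".") i j) i j) i (j-1) = "O") ↔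
        (0 < j ∧ at2 G i (j-1) = "O" ∧ ¬ dottedA G W k i (j-1)) := by
      by_cases h0 : 0 < j
      · rw [write2, at2_ite_pySet2 _ (write1 (pySet2 S i j ".") i j) (i+1) j i (j-1) "."
            (fun hc => ⟨by rw [hlen2]; omega, by rw [hrow2]; exact lt_of_lt_of_le hj (hWle (i+1) (by rw [hlen2] at hc; omega))⟩),
          if_neg (by rintro ⟨_, h, _⟩; omega),
          write1, at2_ite_pySet2 _ (pySet2 S i j ".") (i-1) j i (j-1) "."
            (fun _ => ⟨by rw [hlen1]; omega, by rw [hrow1]; exact lt_of_lt_of_le hj (hWle (i-1) (by omega))⟩),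
          if_neg (by rintro ⟨_, _, h⟩; omega),
          at2_pySet2 S i j i (j-1) "." (by omega) (by rw [hrowS]; exact hrowiW),
          if_neg (by omega),
          hat2S i (j-1) hi (lt_of_lt_of_le (by omega) (hWle i hi))]
        by_cases hd : dottedA G W k i (j-1)
        · simp [hd, show j - 1 < W by omega]
        · simp [hd, show j - 1 < W by omega, h0]
          exact fun _ => h0
      · simp [h0, show ¬ 1 ≤ j by omega]
    have hW4 : ((write3 (write2 (write1 (pySet2 S i j ".") i j) i j) i j).getD 0 []).length = W := by
      rw [hrow4 0, hW0]
    have hC4 : (j+1 < ((write3 (write2 (write1 (pySet2 S i j ".") i j) i j) i j).getD 0 []).length ∧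
          at2 (write3 (write2 (write1 (pySet2 S i j ".") i j) i j) i j) i (j+1) = "O") ↔
        (j+1 < W ∧ at2 G i (j+1) = "O" ∧ ¬ dottedA G W k i (j+1)) := by
      rw [hW4]
      by_cases h0 : j+1 < W
      · rw [write3, at2_ite_pySet2 _ (write2 (write1 (pySet2 S i j ".") i j) i j) i (j-1) i (j+1) "."
            (fun _ => ⟨by rw [hlen3]; omega, by rw [hrow3]; exact lt_of_lt_of_le (by omega) (hWle i hi)⟩),
          if_neg (by rintro ⟨_, _, h⟩; omega),
          write2, at2_ite_pySet2 _ (write1 (pySet2 S i j ".") i j) (i+1) j i (j+1) "."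
            (fun hc => ⟨by rw [hlen2]; omega, by rw [hrow2]; exact lt_of_lt_of_le hj (hWle (i+1) (by rw [hlen2] at hc; omega))⟩),
          if_neg (by rintro ⟨_, h, _⟩; omega),
          write1, at2_ite_pySet2 _ (pySet2 S i j ".") (i-1) j i (j+1) "."
            (fun _ => ⟨by rw [hlen1]; omega, by rw [hrow1]; exact lt_of_lt_of_le hj (hWle (i-1) (by omega))⟩),
          if_neg (by rintro ⟨_, _, h⟩; omega),
          at2_pySet2 S i j i (j+1) "." (by omega) (by rw [hrowS]; exact hrowiW),
          if_neg (by omega),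
          hat2S i (j+1) hi (lt_of_lt_of_le (by omega) (hWle i hi))]
        by_cases hd : dottedA G W k i (j+1)
        · simp [hd, h0]
        · simp [hd, h0]
      · simp [h0]
    -- entry-by-entry comparison with the next rendered state
    apply eq_of_at2_eq _ (render G W (k+1))
      (by rw [hlen5, length_render])
      (fun i' => by rw [hrow5 i', rowlen_render])
    intro i' j' h1 h2
    rw [hlen5] at h1
    rw [hrow5] at h2
    rw [at2_write4 _ i j i' j' (fun hc => ⟨by rw [hlen4]; omega, by
          rw [hrow4]
          have hj1 : j+1 < W := by rw [hW4] at hc; exact hc.1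
          exact lt_of_lt_of_le hj1 (hWle i hi)⟩),
      at2_write3 _ i j i' j' (fun _ => ⟨by rw [hlen3]; omega, by
          rw [hrow3]; exact lt_of_lt_of_le (by omega) (hWle i hi)⟩),
      at2_write2 _ i j i' j' (fun hc => ⟨by rw [hlen2]; omega, by
          rw [hrow2]; exact lt_of_lt_of_le hj (hWle (i+1) (by rw [hlen2] at hc; omega))⟩),
      at2_write1 _ i j i' j' (fun _ => ⟨by rw [hlen1]; omega, by
          rw [hrow1]; exact lt_of_lt_of_le hj (hWle (i-1) (by omega))⟩),
      at2_pySet2 S i j i' j' "." (by omega) (by rw [hrowS]; exact hrowiW),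
      hat2S i' j' h1 h2, at2_render G W (k+1) i' j' h1 h2]
    simp only [hC1, hC2, hC3, hC4]
    by_cases hjW : j' < W
    · have hsucc : dottedA G W (k+1) i' j' ↔
          dottedA G W k i' j' ∨
          ((i' = i ∧ j' = j) ∨
            (at2 G i' j' = "O" ∧ ((i'+1 = i ∧ j' = j) ∨ (i' = i+1 ∧ j' = j) ∨
              (i' = i ∧ j'+1 = j) ∨ (i' = i ∧ j' = j+1)))) := by
        rw [hk, dottedA_succ G W i j i' j' hi hj hjW]
        constructor
        · rintro (h | ⟨_, h⟩)
          · exact Or.inl h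
          · exact Or.inr h
        · rintro (h | h)
          · exact Or.inl h
          · exact Or.inr ⟨hx, h⟩
      simp only [hsucc]
      clear hC1 hC2 hC3 hC4 hlen1 hrow1 hlen2 hrow2 hlen3 hrow3 hlen4 hrow4
        hlen5 hrow5 hat2S hrowS hlenS hvS hrowiW hW4 hSdef
      clear S
      by_cases hd : dottedA G W k i' j'
      · have hRc : j' < W ∧ (dottedA G W k i' j' ∨
            ((i' = i ∧ j' = j) ∨
              (at2 G i' j' = "O" ∧ ((i'+1 = i ∧ j' = j) ∨ (i' = i+1 ∧ j' = j) ∨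
                (i' = i ∧ j'+1 = j) ∨ (i' = i ∧ j' = j+1))))) := ⟨hjW, Or.inl hd⟩
        rw [if_pos hRc, if_pos (⟨hjW, hd⟩ : j' < W ∧ dottedA G W k i' j')]
        split_ifs <;> rfl
      · rw [if_neg (fun h : j' < W ∧ dottedA G W k i' j' => hd h.2)]
        by_cases hR : dottedA G W k i' j' ∨ (i' = i ∧ j' = j) ∨
            at2 G i' j' = "O" ∧ ((i'+1 = i ∧ j' = j) ∨ (i' = i+1 ∧ j' = j) ∨
              (i' = i ∧ j'+1 = j) ∨ (i' = i ∧ j' = j+1))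
        · have hRc : j' < W ∧ (dottedA G W k i' j' ∨ (i' = i ∧ j' = j) ∨
              at2 G i' j' = "O" ∧ ((i'+1 = i ∧ j' = j) ∨ (i' = i+1 ∧ j' = j) ∨
                (i' = i ∧ j'+1 = j) ∨ (i' = i ∧ j' = j+1))) := ⟨hjW, hR⟩
          rw [if_pos hRc]
          rcases hR with h | ⟨e1, e2⟩ | ⟨hoo, hadj⟩
          · exact absurd h hd
          · rw [if_neg (by rintro ⟨⟨_, _, _⟩, f1, f2⟩; omega),
              if_neg (by rintro ⟨⟨a, _, _⟩, f1, f2⟩; omega),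
              if_neg (by rintro ⟨⟨_, _, _⟩, f1, f2⟩; omega),
              if_neg (by rintro ⟨⟨a, _, _⟩, f1, f2⟩; omega),
              if_pos (⟨e1, e2⟩ : i' = i ∧ j' = j)]
          · rcases hadj with ⟨e1, e2⟩ | ⟨e1, e2⟩ | ⟨e1, e2⟩ | ⟨e1, e2⟩
            · -- written by A's first neighbour write: (i', j') = (i-1, j)
              have hb1 : (0 < i ∧ at2 G (i-1) j = "O" ∧ ¬ dottedA G W k (i-1) j) ∧
                  i' = i-1 ∧ j' = j := by
                refine ⟨⟨by omega, ?_, ?_⟩, by omega, e2⟩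
                · rw [show i-1 = i' by omega, ← e2]; exact hoo
                · rw [show i-1 = i' by omega, ← e2]; exact hd
              rw [if_neg (by rintro ⟨⟨_, _, _⟩, f1, f2⟩; omega),
                if_neg (by rintro ⟨⟨a, _, _⟩, f1, f2⟩; omega),
                if_neg (by rintro ⟨⟨_, _, _⟩, f1, f2⟩; omega),
                if_pos hb1]
            · -- (i', j') = (i+1, j)
              have hb2 : (i+1 < G.length ∧ at2 G (i+1) j = "O" ∧ ¬ dottedA G W k (i+1) j) ∧
                  i' = i+1 ∧ j' = j := by
                refine ⟨⟨by omega, ?_, ?_⟩, e1, e2⟩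
                · rw [← e1, ← e2]; exact hoo
                · rw [← e1, ← e2]; exact hd
              rw [if_neg (by rintro ⟨⟨_, _, _⟩, f1, f2⟩; omega),
                if_neg (by rintro ⟨⟨a, _, _⟩, f1, f2⟩; omega),
                if_pos hb2]
            · -- (i', j') = (i, j-1)
              have hb3 : (0 < j ∧ at2 G i (j-1) = "O" ∧ ¬ dottedA G W k i (j-1)) ∧
                  i' = i ∧ j' = j-1 := by
                refine ⟨⟨by omega, ?_, ?_⟩, e1, by omega⟩
                · rw [show j-1 = j' by omega, ← e1]; exact hoo
                · rw [show j-1 = j' by omega, ← e1]; exact hd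
              rw [if_neg (by rintro ⟨⟨_, _, _⟩, f1, f2⟩; omega),
                if_pos hb3]
            · -- (i', j') = (i, j+1)
              have hb4 : (j+1 < W ∧ at2 G i (j+1) = "O" ∧ ¬ dottedA G W k i (j+1)) ∧
                  i' = i ∧ j' = j+1 := by
                refine ⟨⟨by omega, ?_, ?_⟩, e1, e2⟩
                · rw [← e1, ← e2]; exact hoo
                · rw [← e1, ← e2]; exact hd
              rw [if_pos hb4]
        · have hRn : ¬ (j' < W ∧ (dottedA G W k i' j' ∨ (i' = i ∧ j' = j) ∨
              at2 G i' j' = "O" ∧ ((i'+1 = i ∧ j' = j) ∨ (i' = i+1 ∧ j' = j) ∨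
                (i' = i ∧ j'+1 = j) ∨ (i' = i ∧ j' = j+1)))) := fun hh => hR hh.2
          rw [if_neg hRn,
            if_neg (by
              rintro ⟨⟨_, hoo, _⟩, f1, f2⟩
              exact hR (Or.inr (Or.inr ⟨by rw [f1, f2]; exact hoo,
                Or.inr (Or.inr (Or.inr ⟨f1, f2⟩))⟩))),
            if_neg (by
              rintro ⟨⟨a, hoo, _⟩, f1, f2⟩
              exact hR (Or.inr (Or.inr ⟨by rw [f1, f2]; exact hoo,
                Or.inr (Or.inr (Or.inl ⟨f1, by omega⟩))⟩))),
            if_neg (by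
              rintro ⟨⟨_, hoo, _⟩, f1, f2⟩
              exact hR (Or.inr (Or.inr ⟨by rw [f1, f2]; exact hoo,
                Or.inr (Or.inl ⟨f1, f2⟩)⟩))),
            if_neg (by
              rintro ⟨⟨a, hoo, _⟩, f1, f2⟩
              exact hR (Or.inr (Or.inr ⟨by rw [f1, f2]; exact hoo,
                Or.inl ⟨by omega, f2⟩⟩))),
            if_neg (fun h0 : i' = i ∧ j' = j => hR (Or.inr (Or.inl h0)))]
    · -- j' ≥ W: untouched column, both sides keep the original entry
      have h0 : ¬ (i' = i ∧ j' = j) := by omega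
      have h1' : ¬ ((0 < i ∧ at2 G (i-1) j = "O" ∧ ¬ dottedA G W k (i-1) j) ∧ i' = i-1 ∧ j' = j) := by
        rintro ⟨_, _, e⟩; omega
      have h2' : ¬ ((i+1 < G.length ∧ at2 G (i+1) j = "O" ∧ ¬ dottedA G W k (i+1) j) ∧ i' = i+1 ∧ j' = j) := by
        rintro ⟨_, _, e⟩; omega
      have h3' : ¬ ((0 < j ∧ at2 G i (j-1) = "O" ∧ ¬ dottedA G W k i (j-1)) ∧ i' = i ∧ j' = j-1) := by
        rintro ⟨⟨a, _, _⟩, _, e⟩; omega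
      have h4' : ¬ ((j+1 < W ∧ at2 G i (j+1) = "O" ∧ ¬ dottedA G W k i (j+1)) ∧ i' = i ∧ j' = j+1) := by
        rintro ⟨⟨a, _, _⟩, _, e⟩; omega
      rw [if_neg h4', if_neg h3', if_neg h2', if_neg h1', if_neg h0,
        if_neg (fun h : j' < W ∧ _ => hjW h.1), if_neg (fun h : j' < W ∧ _ => hjW h.1)]
lemma dottedA_zero (G : List (List String)) (W i j : Nat) : ¬ dottedA G W 0 i j := by
  rintro (⟨_, h⟩ | ⟨_, ⟨_, _, h⟩ | ⟨_, _, h⟩ | ⟨_, _, h⟩ | ⟨_, _, h⟩⟩) <;> omega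

lemma render_zero (G : List (List String)) (W : Nat) : render G W 0 = G := by
  apply eq_of_at2_eq _ _ (length_render G W 0) (rowlen_render G W 0)
  intro i' j' h1 h2
  rw [length_render] at h1
  rw [rowlen_render] at h2
  rw [at2_render G W 0 i' j' h1 h2, if_neg (fun h => dottedA_zero G W i' j' h.2)]

lemma width_render (G : List (List String)) (W k : Nat) (hne : G ≠ []) (hW : W = (G.headD []).length) :
    ((render G W k).getD 0 []).length = W := by
  rw [rowlen_render, getD_zero_eq_headD G hne, hW]

lemma inner_pass (G : List (List String)) (W i : Nat)
    (hW : W = (G.headD []).length) (pre : ∀ row ∈ G, W ≤ row.length)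
    (hi : i < G.length) :
    ∀ n, n ≤ W →
      (List.range n).foldl (fun g' j' => explosionStep g' i j') (render G W (i*W)) =
        render G W (i*W + n) := by
  intro n
  induction n with
  | zero => intro _; simp
  | succ m ih =>
    intro hm
    rw [List.range_succ, List.foldl_append, ih (by omega)]
    simpa using step_render G W i m hW pre hi (by omega)

lemma outer_pass (G : List (List String)) (W : Nat)
    (hW : W = (G.headD []).length) (pre : ∀ row ∈ G, W ≤ row.length) :
    ∀ n, n ≤ G.length →
      (List.range n).foldl
        (fun g i => (List.range ((g.getD 0 []).length)).foldl (fun g' j => explosionStep g' i j) g)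
        G = render G W (n*W) := by
  intro n
  induction n with
  | zero => simp [render_zero]
  | succ m ih =>
    intro hm
    have hne : G ≠ [] := by
      intro h; rw [h] at hm; simp at hm
    rw [List.range_succ, List.foldl_append, ih (by omega)]
    simp only [List.foldl_cons, List.foldl_nil, width_render G W (m*W) hne hW]
    rw [inner_pass G W m hW pre (by omega) W (le_refl W)]
    congr 1
    ring

lemma explosion_eq_render (G : List (List String))
    (pre : ∀ row ∈ G, (G.headD []).length ≤ row.length) :
    explosion G = render G (G.headD []).length (G.length * (G.headD []).length) := by
  rw [explosion]
  exact outer_pass G (G.headD []).length rfl pre G.length (le_refl _)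

-- ===== B side =====

-- B's state after its first n rows have been rewritten
def renderB (G : List (List String)) (H W n : Nat) : List (List String) :=
  G.mapIdx (fun i row =>
    if i < n then
      (List.range W).map (fun j => if boomB G H W i j then "." else at2 G i j) ++ row.drop W
    else row)

lemma length_renderB (G : List (List String)) (H W n : Nat) :
    (renderB G H W n).length = G.length := by simp [renderB]

lemma getElem_renderB (G : List (List String)) (H W n i : Nat) (hi : i < G.length) :
    (renderB G H W n)[i]'(by simpa [length_renderB] using hi) =
      if i < n then
        (List.range W).map (fun j => if boomB G H W i j then "." else at2 G i j) ++ (G[i]).drop W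
      else G[i] := by
  simp [renderB]

lemma renderB_zero (G : List (List String)) (H W : Nat) : renderB G H W 0 = G := by
  apply List.ext_getElem (length_renderB G H W 0)
  intro i h1 h2
  rw [getElem_renderB G H W 0 i h2, if_neg (by omega)]

lemma getD_renderB_of_ge (G : List (List String)) (H W n i : Nat) (h : n ≤ i) :
    (renderB G H W n).getD i [] = G.getD i [] := by
  by_cases hi : i < G.length
  · rw [getD_eq_getElem_of_lt _ i (by simpa [length_renderB] using hi),
      getD_eq_getElem_of_lt G i hi, getElem_renderB G H W n i hi, if_neg (by omega)]
  · rw [List.getD_eq_getElem?_getD, List.getD_eq_getElem?_getD,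
      List.getElem?_eq_none (by simpa [length_renderB] using Nat.le_of_not_lt hi),
      List.getElem?_eq_none (Nat.le_of_not_lt hi)]

lemma renderB_set (G : List (List String)) (H W n : Nat) (hn : n < G.length) :
    (renderB G H W n).set n
        ((List.range W).map (fun j => if boomB G H W n j then "." else at2 G n j) ++
          ((renderB G H W n).getD n []).drop W) =
      renderB G H W (n+1) := by
  rw [getD_renderB_of_ge G H W n n (le_refl n), getD_eq_getElem_of_lt G n hn]
  apply List.ext_getElem (by simp [length_renderB])
  intro i h1 h2
  rw [List.getElem_set]
  rw [length_renderB] at h2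
  rw [getElem_renderB G H W (n+1) i (by simpa [length_renderB] using h2)]
  by_cases he : n = i
  · subst he
    rw [if_pos rfl, if_pos (by omega)]
  · rw [if_neg he, getElem_renderB G H W n i (by simpa [length_renderB] using h2)]
    by_cases hlt : i < n
    · rw [if_pos hlt, if_pos (by omega)]
    · rw [if_neg hlt, if_neg (by omega)]

lemma alt_pass (G : List (List String)) (H W : Nat) :
    ∀ n, n ≤ G.length →
      (List.range n).foldl
        (fun g i =>
          g.set i (((List.range W).map (fun j => if boomB G H W i j then "." else at2 G i j))
            ++ (g.getD i []).drop W)) G = renderB G H W n := by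
  intro n
  induction n with
  | zero => simp [renderB_zero]
  | succ m ih =>
    intro hm
    rw [List.range_succ, List.foldl_append, ih (by omega)]
    simpa using renderB_set G H W m (by omega)

lemma explosion_alt_eq_renderB (G : List (List String)) :
    explosion_alt G = renderB G G.length (G.headD []).length G.length := by
  cases G with
  | nil => rfl
  | cons r0 tl =>
    rw [explosion_alt]
    exact alt_pass (r0 :: tl) (r0 :: tl).length r0.length (r0 :: tl).length (le_refl _)

lemma boom_iff_dotted (G : List (List String)) (W i j : Nat)
    (hW : W = (G.headD []).length) (hi : i < G.length) (hj : j < W) :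
    boomB G G.length W i j = true ↔ dottedA G W (G.length * W) i j := by
  rw [boomB]
  by_cases hx : at2 G i j = "X"
  · simp only [hx]
    constructor
    · intro _
      exact Or.inl ⟨hx, pos_lt G.length W i j hi hj⟩
    · intro _; rfl
  · rw [if_neg hx]
    by_cases ho : at2 G i j = "O"
    · rw [if_pos ho]
      simp only [decide_eq_true_eq]
      constructor
      · rintro (⟨h0, hX⟩ | ⟨h0, hX⟩ | ⟨h0, hX⟩ | ⟨h0, hX⟩)
        · exact Or.inr ⟨ho, Or.inl ⟨h0, hX, pos_lt G.length W (i-1) j (by omega) hj⟩⟩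
        · exact Or.inr ⟨ho, Or.inr (Or.inl ⟨h0, hX, pos_lt G.length W (i+1) j h0 hj⟩)⟩
        · exact Or.inr ⟨ho, Or.inr (Or.inr (Or.inl ⟨h0, hX, pos_lt G.length W i (j-1) hi (by omega)⟩))⟩
        · exact Or.inr ⟨ho, Or.inr (Or.inr (Or.inr ⟨h0, hX, pos_lt G.length W i (j+1) hi h0⟩))⟩
      · rintro (⟨hX, _⟩ | ⟨_, ⟨h0, hX, _⟩ | ⟨h0, hX, _⟩ | ⟨h0, hX, _⟩ | ⟨h0, hX, _⟩⟩)
        · exact absurd hX hx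
        · exact Or.inl ⟨h0, hX⟩
        · exact Or.inr (Or.inl ⟨h0, hX⟩)
        · exact Or.inr (Or.inr (Or.inl ⟨h0, hX⟩))
        · exact Or.inr (Or.inr (Or.inr ⟨h0, hX⟩))
    · rw [if_neg ho]
      constructor
      · intro h; exact absurd h (by decide)
      · rintro (⟨hX, _⟩ | ⟨hO, _⟩)
        · exact absurd hX hx
        · exact absurd hO ho

lemma renderB_eq_render (G : List (List String)) (W : Nat)
    (hW : W = (G.headD []).length) (pre : ∀ row ∈ G, W ≤ row.length) :
    renderB G G.length W G.length = render G W (G.length * W) := by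
  apply List.ext_getElem (by rw [length_renderB, length_render])
  intro i h1 h2
  rw [length_renderB] at h1
  rw [getElem_renderB G G.length W G.length i h1, if_pos h1,
    getElem_render G W (G.length * W) i h1]
  have hrow : W ≤ (G[i]).length := pre _ (List.getElem_mem h1)
  apply List.ext_getElem (by simp; omega)
  intro j hj1 hj2
  rw [List.getElem_mapIdx]
  by_cases hjW : j < W
  · rw [List.getElem_append_left (by simpa using hjW), List.getElem_map, List.getElem_range]
    have hat : at2 G i j = G[i][j] := at2_eq_getElem G i j h1 (by omega)
    by_cases hb : boomB G G.length W i j = true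
    · rw [if_pos hb, if_pos ⟨hjW, (boom_iff_dotted G W i j hW h1 hjW).mp hb⟩]
    · rw [if_neg hb, if_neg (fun h : j < W ∧ _ => hb ((boom_iff_dotted G W i j hW h1 hjW).mpr h.2)), hat]
  · rw [List.getElem_append_right (by simpa using hjW), if_neg (fun h => hjW h.1)]
    simp only [List.length_map, List.length_range]
    rw [List.getElem_drop]
    congr 1
    omega

-- ===== VERDICT (by name: the statement is the Claim_ definition above) =====
theorem explosion_spec : Claim_equal_explosion := by
  intro grid _ pre
  unfold Spec_explosion
  have pre' : ∀ row ∈ grid, (grid.headD []).length ≤ row.length := pre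
  rw [explosion_eq_render grid pre', explosion_alt_eq_renderB grid,
    renderB_eq_render grid (grid.headD []).length rfl pre']
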